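-- pv_equiv track=rewrite | github.com/AustinBao/LeetCode | Contest/CCC/2022/Harp Tuning (multiple functions).py | makeStringList
-- ===== SOURCE A (Python) =====
-- def makeStringList(strtolist):
--     substrings = ""
--     listofstrings = []
--     for i in strtolist:
--         if i == "tighten" or i == "loosen":
--             listofstrings.append(substrings)
--             substrings = ""
--         if i.isalpha():
--             if len(i) == 1:
--                 substrings += i
--         else:
--             continue
--     return listofstrings
-- ===== SOURCE B (Python) =====
-- def makeStringList(strtolist):
--     # Two-phase decomposition: repeatedly find the next keyword, slice the
--     # segment before it, join its single-letter alphabetic tokens, recurse on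
--     # the remainder.  No trailing segment after the last keyword is emitted
--     # (exactly as A never flushes its tail accumulator).
--     out = []
--     rest = strtolist
--     while True:
--         k = next((j for j, t in enumerate(rest) if t == "tighten" or t == "loosen"), None)
--         if k is None:
--             return out
--         out.append("".join(t for t in rest[:k] if len(t) == 1 and t.isalpha()))
--         rest = rest[k + 1:]
-- ===== Notes on version B (the rewrite author's own statement) =====
-- stated objective: alternative
-- what changed: A makes one pass with a running string accumulator reset at each keyword; B instead finds the next keyword index, slices the segment before it and joins its single-letter alphabetic tokens, looping on the remainder (find/slice/join decomposition).
import Mathlib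
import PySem

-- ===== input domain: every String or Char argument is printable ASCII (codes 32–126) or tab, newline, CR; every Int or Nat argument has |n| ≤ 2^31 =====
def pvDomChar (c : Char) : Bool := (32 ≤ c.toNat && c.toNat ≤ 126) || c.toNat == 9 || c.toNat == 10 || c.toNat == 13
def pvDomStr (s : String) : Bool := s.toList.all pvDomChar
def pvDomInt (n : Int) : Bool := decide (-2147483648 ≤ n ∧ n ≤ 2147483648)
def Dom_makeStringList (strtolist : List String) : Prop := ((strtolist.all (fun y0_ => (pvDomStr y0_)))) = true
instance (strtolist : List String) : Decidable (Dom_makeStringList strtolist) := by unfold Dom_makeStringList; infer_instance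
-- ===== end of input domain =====

-- B replaces A's running string accumulator by a find-keyword / slice / join loop; same cost, different decomposition.

-- ===== PORT A =====
-- one loop: on a keyword flush and reset the accumulator, then add single alphabetic letters
def makeStringList (strtolist : List String) : List String :=
  (strtolist.foldl
    (fun (st : String × List String) i =>
      let st := if i = "tighten" ∨ i = "loosen" then ("", st.2 ++ [st.1]) else st
      if PySem.Str.strIsalpha i then
        if PySem.Str.len i = 1 then (st.1 ++ i, st.2) else st
      else st)
    ("", [])).2

-- ===== PORT B =====
def pvKw (t : String) : Bool := t == "tighten" || t == "loosen"

def pvSeg (seg : List String) : String :=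
  PySem.Str.join "" (seg.filter (fun t => PySem.Str.len t == 1 && PySem.Str.strIsalpha t))

-- the while-loop of Source B: find the next keyword index, slice, join, continue on the remainder
def makeStringList_altLoop (out rest : List String) : List String :=
  match h : rest.findIdx? pvKw with
  | none => out
  | some k => makeStringList_altLoop (out ++ [pvSeg (rest.take k)]) (rest.drop (k + 1))
termination_by rest.length
decreasing_by
  have hk := List.findIdx?_eq_some_iff_findIdx_eq.mp h
  simp only [List.length_drop]
  omega

def makeStringList_alt (strtolist : List String) : List String :=
  makeStringList_altLoop [] strtolist

-- ===== PRECONDITION & SPEC =====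
def Spec_makeStringList (strtolist : List String) (out : List String) : Prop := out = makeStringList_alt strtolist
instance (strtolist : List String) (out : List String) : Decidable (Spec_makeStringList strtolist out) := by unfold Spec_makeStringList; infer_instance

-- ===== CLAIM (what is proved, stated in full; the proofs are below) =====
def Claim_equal_makeStringList : Prop := ∀ (strtolist : List String), Dom_makeStringList strtolist → Spec_makeStringList strtolist (makeStringList strtolist)

-- ===== LEMMAS AND PROOFS =====

-- the common recursive characterisation
def pvAdd (cur : String) (t : String) : String :=
  if PySem.Str.strIsalpha t then (if PySem.Str.len t = 1 then cur ++ t else cur) else cur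

def pvGo : String → List String → List String
  | _, [] => []
  | cur, t :: ts => if pvKw t then cur :: pvGo (pvAdd "" t) ts else pvGo (pvAdd cur t) ts

lemma pvGo_A (l : List String) : ∀ (cur : String) (acc : List String),
    (l.foldl
      (fun (st : String × List String) i =>
        let st := if i = "tighten" ∨ i = "loosen" then ("", st.2 ++ [st.1]) else st
        if PySem.Str.strIsalpha i then
          if PySem.Str.len i = 1 then (st.1 ++ i, st.2) else st
        else st)
      (cur, acc)).2 = acc ++ pvGo cur l := by
  induction l with
  | nil => intro cur acc; simp [pvGo]
  | cons t ts ih =>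
    intro cur acc
    by_cases hkw : t = "tighten" ∨ t = "loosen"
    · have hkb : pvKw t = true := by
        rcases hkw with h | h <;> simp [pvKw, h]
      by_cases ha : PySem.Chars.strIsalpha t.toList = true
      · by_cases h1 : t.length = 1
        · simp only [List.foldl_cons, hkw, ite_true]
          rw [ih]
          simp [pvGo, hkb, pvAdd, ha, h1]
        · simp only [List.foldl_cons, hkw, ite_true]
          rw [show (if PySem.Str.strIsalpha t then
              if PySem.Str.len t = 1 then (("" : String) ++ t, acc ++ [cur]) else ("", acc ++ [cur])
            else ("", acc ++ [cur])) = ("", acc ++ [cur]) from by simp [ha, h1]]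
          rw [ih]
          simp [pvGo, hkb, pvAdd, ha, h1]
      · simp only [List.foldl_cons, hkw, ite_true]
        rw [show (if PySem.Str.strIsalpha t then
            if PySem.Str.len t = 1 then (("" : String) ++ t, acc ++ [cur]) else ("", acc ++ [cur])
          else ("", acc ++ [cur])) = ("", acc ++ [cur]) from by simp [ha]]
        rw [ih]
        simp [pvGo, hkb, pvAdd, ha]
    · have hkb : pvKw t = false := by
        simp only [pvKw, Bool.or_eq_false_iff, beq_eq_false_iff_ne, ne_eq]
        exact ⟨fun h => hkw (Or.inl h), fun h => hkw (Or.inr h)⟩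
      by_cases ha : PySem.Chars.strIsalpha t.toList = true
      · by_cases h1 : t.length = 1
        · simp only [List.foldl_cons, if_neg hkw]
          rw [show (if PySem.Str.strIsalpha t then
              if PySem.Str.len t = 1 then (cur ++ t, acc) else (cur, acc)
            else (cur, acc)) = (cur ++ t, acc) from by simp [ha, h1]]
          rw [ih]
          simp [pvGo, hkb, pvAdd, ha, h1]
        · simp only [List.foldl_cons, if_neg hkw]
          rw [show (if PySem.Str.strIsalpha t then
              if PySem.Str.len t = 1 then (cur ++ t, acc) else (cur, acc)
            else (cur, acc)) = (cur, acc) from by simp [ha, h1]]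
          rw [ih]
          simp [pvGo, hkb, pvAdd, ha, h1]
      · simp only [List.foldl_cons, if_neg hkw]
        rw [show (if PySem.Str.strIsalpha t then
            if PySem.Str.len t = 1 then (cur ++ t, acc) else (cur, acc)
          else (cur, acc)) = (cur, acc) from by simp [ha]]
        rw [ih]
        simp [pvGo, hkb, pvAdd, ha]

lemma pvGo_no_kw (l : List String) (hl : ∀ x ∈ l, pvKw x = false) (cur : String) :
    pvGo cur l = [] := by
  induction l generalizing cur with
  | nil => rfl
  | cons t ts ih =>
    have ht := hl t (by simp)
    simp [pvGo, ht]
    exact ih (fun x hx => hl x (by simp [hx])) _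

lemma pvJoin_empty_cons (a : List Char) (l : List (List Char)) :
    PySem.Chars.join [] (a :: l) = a ++ PySem.Chars.join [] l := by
  cases l with
  | nil => simp [PySem.Chars.join_singleton, PySem.Chars.join_nil]
  | cons b m => simp [PySem.Chars.join_cons_cons]

lemma pvSeg_cons_pred (t : String) (p : List String)
    (h : (PySem.Str.len t == 1 && PySem.Str.strIsalpha t) = true) :
    pvSeg (t :: p) = t ++ pvSeg p := by
  apply String.toList_injective
  simp only [pvSeg, List.filter_cons, h, if_pos, String.toList_append]
  rw [PySem.Str.toList_join, PySem.Str.toList_join]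
  simp only [List.map_cons]
  have : ("" : String).toList = [] := rfl
  rw [this, pvJoin_empty_cons]

lemma pvSeg_nil : pvSeg [] = "" := by
  apply String.toList_injective
  simp only [pvSeg, List.filter_nil]
  rw [PySem.Str.toList_join]
  simp [PySem.Chars.join_nil]

lemma pvKw_eq_true_iff (t : String) : pvKw t = true ↔ t = "tighten" ∨ t = "loosen" := by
  simp [pvKw]

lemma pvAdd_kw (t : String) (ht : pvKw t = true) : pvAdd "" t = "" := by
  rcases (pvKw_eq_true_iff t).mp ht with h | h <;> subst h <;> decide

lemma pvGo_split (p : List String) (hp : ∀ x ∈ p, pvKw x = false)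
    (t : String) (ht : pvKw t = true) (s : List String) :
    ∀ cur : String, pvGo cur (p ++ t :: s) = (cur ++ pvSeg p) :: pvGo "" s := by
  induction p with
  | nil =>
    intro cur
    simp only [List.nil_append, pvGo, ht, ite_true, pvAdd_kw t ht, pvSeg_nil]
    rw [show cur ++ "" = cur from by apply String.toList_injective; simp]
  | cons x p' ih =>
    intro cur
    have hx : pvKw x = false := hp x (by simp)
    have hp' : ∀ y ∈ p', pvKw y = false := fun y hy => hp y (by simp [hy])
    simp only [List.cons_append, pvGo, hx, Bool.false_eq_true, ite_false]
    rw [ih hp' (pvAdd cur x)]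
    by_cases hpred : (PySem.Str.len x == 1 && PySem.Str.strIsalpha x) = true
    · have h1 : PySem.Str.len x = 1 := by
        have := (Bool.and_eq_true _ _).mp hpred
        exact beq_iff_eq.mp this.1
      have ha : PySem.Str.strIsalpha x = true := ((Bool.and_eq_true _ _).mp hpred).2
      rw [pvSeg_cons_pred x p' hpred]
      simp only [pvAdd, ha, h1, ite_true]
      rw [show cur ++ (x ++ pvSeg p') = cur ++ x ++ pvSeg p' from by
        apply String.toList_injective; simp]
    · have hseg : pvSeg (x :: p') = pvSeg p' := by
        simp only [pvSeg, List.filter_cons, hpred, Bool.false_eq_true, ite_false]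
      have hadd : pvAdd cur x = cur := by
        by_cases ha : PySem.Str.strIsalpha x = true
        · have h1 : ¬ PySem.Str.len x = 1 := by
            intro h1
            exact hpred (by rw [Bool.and_eq_true, beq_iff_eq]; exact ⟨h1, ha⟩)
          simp only [pvAdd]
          rw [if_pos ha, if_neg h1]
        · simp only [pvAdd]
          rw [if_neg ha]
      rw [hseg, hadd]

lemma pvGo_B (out rest : List String) :
    makeStringList_altLoop out rest = out ++ pvGo "" rest := by
  induction out, rest using makeStringList_altLoop.induct with
  | case1 out rest h =>
    rw [makeStringList_altLoop, h]
    have : ∀ x ∈ rest, pvKw x = false := by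
      intro x hx
      have := List.findIdx?_eq_none_iff.mp h
      simpa using this x hx
    rw [pvGo_no_kw rest this, List.append_nil]
  | case2 out rest k h ih =>
    rw [makeStringList_altLoop, h]
    show makeStringList_altLoop (out ++ [pvSeg (rest.take k)]) (rest.drop (k + 1)) =
      out ++ pvGo "" rest
    rw [ih]
    have hk := List.findIdx?_eq_some_iff_findIdx_eq.mp h
    have hklen : k < rest.length := hk.1
    have hsplit : rest = rest.take k ++ rest[k] :: rest.drop (k + 1) := by
      conv_lhs => rw [← List.take_append_drop k rest]
      rw [List.getElem_cons_drop hklen]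
    have htk : pvKw rest[k] = true := by
      have := List.findIdx_getElem (w := hk.2 ▸ hklen)
      simpa [hk.2] using this
    have hpre : ∀ x ∈ rest.take k, pvKw x = false := by
      intro x hx
      obtain ⟨i, hi, rfl⟩ := List.mem_take_iff_getElem.mp hx
      have hik : i < k := lt_of_lt_of_le hi (by omega)
      have := List.not_of_lt_findIdx (p := pvKw) (xs := rest) (hk.2 ▸ hik)
      simpa using this
    conv_rhs => rw [hsplit]
    rw [pvGo_split (rest.take k) hpre rest[k] htk (rest.drop (k + 1)) ""]
    rw [show ("" : String) ++ pvSeg (rest.take k) = pvSeg (rest.take k) from by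
      apply String.toList_injective; simp]
    simp

-- ===== VERDICT (by name: the statement is the Claim_ definition above) =====
theorem makeStringList_spec : Claim_equal_makeStringList := by
  intro l _
  unfold Spec_makeStringList makeStringList makeStringList_alt
  rw [pvGo_A l "" [], pvGo_B [] l]
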